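-- pv_equiv track=rewrite | github.com/ablayed/islamic-ner | scripts/download_data.py | detect_tashkeel_variants
-- ===== SOURCE A (Python) =====
-- def detect_tashkeel_variants(csv_paths: list[str]) -> tuple[bool, bool]:
--     """Heuristically detect whether with/without-tashkeel files are present."""
--
--     lower_paths = [path.lower() for path in csv_paths]
--     without_markers = ("without", "no_tashkeel", "no-tashkeel", "without_tashkeel")
--     with_markers = ("tashkeel", "diacritic", "mushakkala")
--
--     has_without = any(any(marker in path for marker in without_markers) for path in lower_paths) or any(
--         not any(marker in path for marker in with_markers) for path in lower_paths
--     )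
--     has_with = any(any(marker in path for marker in with_markers) for path in lower_paths)
--
--     return has_with, has_without
-- ===== SOURCE B (Python) =====
-- def detect_tashkeel_variants(csv_paths: list[str]) -> tuple[bool, bool]:
--     """Heuristically detect whether with/without-tashkeel files are present."""
--
--     # "without_tashkeel" always contains "without", so three without-markers suffice.
--     with_markers = ("tashkeel", "diacritic", "mushakkala")
--     without_markers = ("without", "no_tashkeel", "no-tashkeel")
--
--     has_with = False
--     clean = True  # so far every path has a with-marker and no without-marker
--     for path in csv_paths:
--         p = path.lower()
--         w = any(m in p for m in with_markers)
--         if w: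
--             has_with = True
--         if not w or any(m in p for m in without_markers):
--             clean = False
--     return has_with, not clean
-- ===== Notes on version B (the rewrite author's own statement) =====
-- stated objective: simpler
-- what changed: B drops the redundant marker 'without_tashkeel' (subsumed by 'without' via substring containment) and replaces A's two existential any()-scans for has_without by the De Morgan dual: a single pass that maintains the negated invariant 'clean' (every path seen has a with-marker and no without-marker) and returns not clean.
import Mathlib
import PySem

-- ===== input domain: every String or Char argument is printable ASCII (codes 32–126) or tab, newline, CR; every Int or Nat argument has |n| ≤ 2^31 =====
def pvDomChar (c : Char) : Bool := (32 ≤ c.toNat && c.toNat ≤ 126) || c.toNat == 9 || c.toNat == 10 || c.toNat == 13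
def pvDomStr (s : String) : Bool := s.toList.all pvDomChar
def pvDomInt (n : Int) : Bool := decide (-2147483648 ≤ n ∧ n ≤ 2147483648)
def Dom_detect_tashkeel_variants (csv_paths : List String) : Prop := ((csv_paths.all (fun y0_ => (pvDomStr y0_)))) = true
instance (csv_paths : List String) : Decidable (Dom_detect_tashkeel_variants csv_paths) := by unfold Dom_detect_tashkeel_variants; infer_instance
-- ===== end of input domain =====

-- B drops the redundant marker "without_tashkeel" (subsumed by "without") and computes
-- has_without by De Morgan: one pass maintaining the negated invariant 'clean'; simpler.

-- ===== PORT A =====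
def withoutMarkersA : List String := ["without", "no_tashkeel", "no-tashkeel", "without_tashkeel"]
def withMarkers : List String := ["tashkeel", "diacritic", "mushakkala"]

def detect_tashkeel_variants (csv_paths : List String) : Bool × Bool :=
  let lower_paths := csv_paths.map PySem.Str.lower
  let has_without :=
    (lower_paths.any (fun path => withoutMarkersA.any (fun marker => PySem.Str.isIn marker path)))
      || (lower_paths.any (fun path => !(withMarkers.any (fun marker => PySem.Str.isIn marker path))))
  let has_with := lower_paths.any (fun path => withMarkers.any (fun marker => PySem.Str.isIn marker path))
  (has_with, has_without)

-- ===== PORT B =====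
def withoutMarkersB : List String := ["without", "no_tashkeel", "no-tashkeel"]

-- one loop iteration of B: lowercase once, update (has_with, clean)
def altStep (st : Bool × Bool) (path : String) : Bool × Bool :=
  let p := PySem.Str.lower path
  let w := withMarkers.any (fun m => PySem.Str.isIn m p)
  let hw := if w then true else st.1
  let clean := if !w || withoutMarkersB.any (fun m => PySem.Str.isIn m p) then false else st.2
  (hw, clean)

def detect_tashkeel_variants_alt (csv_paths : List String) : Bool × Bool :=
  let st := csv_paths.foldl altStep (false, true)
  (st.1, !st.2)

-- ===== PRECONDITION & SPEC =====
def Spec_detect_tashkeel_variants (csv_paths : List String) (out : Bool × Bool) : Prop := out = detect_tashkeel_variants_alt csv_paths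
instance (csv_paths : List String) (out : Bool × Bool) : Decidable (Spec_detect_tashkeel_variants csv_paths out) := by unfold Spec_detect_tashkeel_variants; infer_instance

-- ===== CLAIM (what is proved, stated in full; the proofs are below) =====
def Claim_equal_detect_tashkeel_variants : Prop := ∀ (csv_paths : List String), Dom_detect_tashkeel_variants csv_paths → Spec_detect_tashkeel_variants csv_paths (detect_tashkeel_variants csv_paths)

-- ===== LEMMAS AND PROOFS =====

-- a path containing "without_tashkeel" contains "without" (prefix, hence infix transitivity)
theorem isIn_without_of_without_tashkeel (p : String) :
    PySem.Str.isIn "without_tashkeel" p = true → PySem.Str.isIn "without" p = true := by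
  rw [PySem.Str.isIn_iff_infix, PySem.Str.isIn_iff_infix]
  intro h
  exact List.IsInfix.trans (by decide : ("without".toList : List Char) <:+: "without_tashkeel".toList) h

-- A's four without-markers test equals B's three-marker test on any path
theorem woA_eq_woB (p : String) :
    withoutMarkersA.any (fun m => PySem.Str.isIn m p)
      = withoutMarkersB.any (fun m => PySem.Str.isIn m p) := by
  cases h : PySem.Str.isIn "without_tashkeel" p with
  | false =>
    simp only [withoutMarkersA, withoutMarkersB, List.any_cons, List.any_nil, h, Bool.or_false]
  | true =>
    have h1 : PySem.Str.isIn "without" p = true := isIn_without_of_without_tashkeel p h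
    simp only [withoutMarkersA, withoutMarkersB, List.any_cons, List.any_nil, h1, Bool.true_or]

-- B's fold carries has_with as an 'or' and clean as an 'and' over per-path tests
theorem fold_alt_spec (l : List String) (a c : Bool) :
    (l.foldl altStep (a, c)) =
    (a || l.any (fun path => withMarkers.any (fun m => PySem.Str.isIn m (PySem.Str.lower path))),
     c && l.all (fun path =>
        withMarkers.any (fun m => PySem.Str.isIn m (PySem.Str.lower path))
          && !(withoutMarkersB.any (fun m => PySem.Str.isIn m (PySem.Str.lower path))))) := by
  induction l generalizing a c with
  | nil => simp
  | cons x xs ih =>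
    rw [List.foldl_cons, ih]
    cases hw : withMarkers.any (fun m => PySem.Str.isIn m (PySem.Str.lower x)) <;>
      cases hwo : withoutMarkersB.any (fun m => PySem.Str.isIn m (PySem.Str.lower x)) <;>
        simp only [altStep, hw, hwo, List.any_cons, List.all_cons] <;> simp

-- A's two-scan has_without equals B's single-scan disjunction path by path
theorem has_without_eq (l : List String) :
    ((l.any fun x => withoutMarkersA.any fun m => PySem.Str.isIn m (PySem.Str.lower x)) ||
       l.any fun x => !withMarkers.any fun m => PySem.Str.isIn m (PySem.Str.lower x))
      = l.any (fun x => (!withMarkers.any fun m => PySem.Str.isIn m (PySem.Str.lower x)) ||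
          withoutMarkersB.any fun m => PySem.Str.isIn m (PySem.Str.lower x)) := by
  induction l with
  | nil => simp
  | cons x xs ih =>
    simp only [List.any_cons]
    rw [woA_eq_woB, ← ih]
    cases withoutMarkersB.any fun m => PySem.Str.isIn m (PySem.Str.lower x) <;>
      cases withMarkers.any fun m => PySem.Str.isIn m (PySem.Str.lower x) <;>
        cases xs.any fun x => withoutMarkersA.any fun m => PySem.Str.isIn m (PySem.Str.lower x) <;>
          cases xs.any fun x => !withMarkers.any fun m => PySem.Str.isIn m (PySem.Str.lower x) <;> rfl

-- ===== VERDICT (by name: the statement is the Claim_ definition above) =====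
theorem detect_tashkeel_variants_spec : Claim_equal_detect_tashkeel_variants := by
  intro csv_paths _
  unfold Spec_detect_tashkeel_variants detect_tashkeel_variants detect_tashkeel_variants_alt
  rw [fold_alt_spec]
  simp only [List.any_map, Function.comp_def, Bool.false_or, Bool.true_and, Prod.mk.injEq,
    List.all_eq_not_any_not, Bool.not_not, Bool.not_and]
  exact ⟨trivial, has_without_eq csv_paths⟩
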